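-- pv_equiv track=rewrite | github.com/conradtchan/jobmon | backend/showbf.py | compact
-- ===== SOURCE A (Python) =====
-- def mysplit(s):
--     head = s.rstrip("0123456789")
--     tail = s[len(head) :]
--     return head, tail
--
-- def compact(l):
--     c = {}
--     for i in l:
--         pre, n = mysplit(i)
--         if pre not in c.keys():
--             c[pre] = []
--         c[pre].append(int(n))
--     # sort
--     cc = {}
--     for i in c.keys():
--         c[i].sort()
--     return c
-- ===== SOURCE B (Python) =====
-- def compact(l):
--     c = {}
--     for s in l:
--         k = len(s)
--         while k and s[k - 1].isdigit():
--             k -= 1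
--         n = int(s[k:])
--         grp = c.setdefault(s[:k], [])
--         i = 0
--         while i < len(grp) and grp[i] <= n:
--             i += 1
--         grp.insert(i, n)
--     return c
-- ===== Notes on version B (the rewrite author's own statement) =====
-- stated objective: alternative
-- what changed: B makes a single pass that splits each string with a backward digit scan and keeps each group's list sorted by inserting every number at its position (online insertion), instead of A's append-everything-then-sort-every-group two-phase approach; Pre_ excludes inputs containing a string with no trailing digit, on which both A and B raise ValueError from int('').
import Mathlib
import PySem

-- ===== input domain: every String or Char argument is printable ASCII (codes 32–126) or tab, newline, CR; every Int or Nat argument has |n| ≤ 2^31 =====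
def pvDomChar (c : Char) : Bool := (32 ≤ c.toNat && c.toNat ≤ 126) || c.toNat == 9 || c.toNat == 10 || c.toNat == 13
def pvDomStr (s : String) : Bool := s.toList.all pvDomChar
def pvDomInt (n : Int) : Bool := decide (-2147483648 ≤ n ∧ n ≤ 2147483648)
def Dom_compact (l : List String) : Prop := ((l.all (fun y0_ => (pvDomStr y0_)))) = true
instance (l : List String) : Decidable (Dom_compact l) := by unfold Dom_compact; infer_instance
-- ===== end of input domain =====

-- B replaces A's two-phase append-then-sort-each-group by a single pass that keeps every
-- group's list sorted via insertion at the scanned position (alternative decomposition).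

-- ===== PORT A =====
-- mysplit: s.rstrip("0123456789") hand-ported on the char list (exact: rstrip(chars) removes the
-- longest trailing run of chars from the set); the tail s[len(head):] is List.drop at that
-- in-range nonnegative index.
def mysplit (s : String) : String × String :=
  let cs := s.toList
  let head := (cs.reverse.dropWhile (fun c => decide (c ∈ ("0123456789" : String).toList))).reverse
  (String.ofList head, String.ofList (cs.drop head.length))

-- loop body of A's first loop; int(n) is PySem.Int.ofStr? (some-valued on Pre_, so the default 0 is unused there)
def stepA (c : PySem.Dict String (List Int)) (i : String) : PySem.Dict String (List Int) :=
  let pn := mysplit i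
  (if c.contains pn.1 then c else c.insert pn.1 ([] : List Int)).modify pn.1 []
    (· ++ [(PySem.Int.ofStr? pn.2).getD 0])

def compact (l : List String) : List (String × List Int) :=
  let c := l.foldl stepA PySem.Dict.empty
  -- for i in c.keys(): c[i].sort()
  let c := c.keys.foldl (fun d k => d.modify k [] (fun v => PySem.List.sorted v (fun x => x) false)) c
  c.items

-- ===== PORT B =====
-- 'while k and s[k-1].isdigit(): k -= 1' as structural recursion on k; the single-char
-- .isdigit() is Char.isDigit (exact on the ASCII domain these theorems are about)
def kLoop (cs : List Char) : Nat → Nat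
  | 0 => 0
  | k+1 => if (cs.getD k ' ').isDigit then kLoop cs k else (k+1)

-- 'i = 0; while i < len(grp) and grp[i] <= n: i += 1' as structural recursion on grp
def insPos (n : Int) : List Int → Nat
  | [] => 0
  | x :: t => if x ≤ n then insPos n t + 1 else 0

-- loop body of B: split by the backward digit scan, then setdefault + sorted insertion
def stepB (c : PySem.Dict String (List Int)) (s : String) : PySem.Dict String (List Int) :=
  let cs := s.toList
  let k := kLoop cs cs.length
  let n := (PySem.Int.ofStr? (String.ofList (cs.drop k))).getD 0
  let head := String.ofList (cs.take k)
  let c1 := if c.contains head then c else c.insert head ([] : List Int)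
  c1.modify head [] (fun g => PySem.List.insert g (insPos n g) n)

def compact_alt (l : List String) : List (String × List Int) :=
  (l.foldl stepB PySem.Dict.empty).items

-- ===== PRECONDITION & SPEC =====
-- Pre_ excludes exactly the inputs containing a string with no trailing digit, on which A's
-- int('') raises ValueError (B raises there too).
def Pre_compact (l : List String) : Prop :=
  ∀ s ∈ l, (s.toList.getLast?.elim false Char.isDigit) = true
instance (l : List String) : Decidable (Pre_compact l) := by unfold Pre_compact; infer_instance

def pvWitness_compact : List String := ["node1", "node10", "gpu2", "node3"]

def Spec_compact (l : List String) (out : List (String × List Int)) : Prop := out = compact_alt l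
instance (l : List String) (out : List (String × List Int)) : Decidable (Spec_compact l out) := by unfold Spec_compact; infer_instance

-- ===== CLAIM (what is proved, stated in full; the proofs are below) =====
def Claim_equal_compact : Prop := ∀ (l : List String), Dom_compact l → Pre_compact l → Spec_compact l (compact l)

-- ===== LEMMAS AND PROOFS =====

-- the (prefix, value) pair a single string contributes
def pr (s : String) : String × Int := ((mysplit s).1, (PySem.Int.ofStr? (mysplit s).2).getD 0)

-- the guarded setdefault-style key insertion both loop bodies perform
def gIns (d : PySem.Dict String (List Int)) (s : String) : PySem.Dict String (List Int) :=
  if d.contains (pr s).1 then d else d.insert (pr s).1 ([] : List Int)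

-- B's insertion step, as a function of the group list and the new value
def insStep (g : List Int) (n : Int) : List Int := PySem.List.insert g (insPos n g) n

theorem digit_pred (c : Char) :
    (decide (c ∈ ("0123456789" : String).toList)) = c.isDigit := by
  have h : ("0123456789" : String).toList = ['0','1','2','3','4','5','6','7','8','9'] := by decide
  rw [h]
  simp only [List.mem_cons, List.not_mem_nil, or_false, Char.isDigit, Char.ext_iff,
    UInt32.le_iff_toNat_le, UInt32.ext_iff]
  rw [← Bool.decide_and, decide_eq_decide]
  simp only [show ('0':Char).val.toNat = 48 from rfl, show ('1':Char).val.toNat = 49 from rfl,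
    show ('2':Char).val.toNat = 50 from rfl, show ('3':Char).val.toNat = 51 from rfl,
    show ('4':Char).val.toNat = 52 from rfl, show ('5':Char).val.toNat = 53 from rfl,
    show ('6':Char).val.toNat = 54 from rfl, show ('7':Char).val.toNat = 55 from rfl,
    show ('8':Char).val.toNat = 56 from rfl, show ('9':Char).val.toNat = 57 from rfl]
  omega

theorem kLoop_append (cs : List Char) (c : Char) :
    ∀ k, k ≤ cs.length → kLoop (cs ++ [c]) k = kLoop cs k := by
  intro k
  induction k with
  | zero => intro _; rfl
  | succ k ih =>
      intro hk
      have hlt : k < cs.length := by omega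
      simp only [kLoop, List.getD_append _ _ _ _ hlt, ih (by omega)]

theorem kLoop_len (cs : List Char) :
    kLoop cs cs.length = ((cs.reverse.dropWhile Char.isDigit).reverse).length := by
  induction cs using List.reverseRecOn with
  | nil => rfl
  | append_singleton cs c ih =>
      have hlen : (cs ++ [c]).length = cs.length + 1 := by simp
      rw [hlen]
      simp only [kLoop, List.getD_append_right _ _ _ _ (le_refl cs.length),
        Nat.sub_self, List.getD_cons_zero]
      cases hd : c.isDigit with
      | true =>
          rw [if_pos rfl, kLoop_append cs c _ (le_refl _), ih]
          simp [hd]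
      | false =>
          rw [if_neg Bool.false_ne_true]
          simp [hd]

-- cs splits as the stripped head followed by the trailing digit run
theorem head_tail_split (cs : List Char) :
    cs = (cs.reverse.dropWhile Char.isDigit).reverse ++ (cs.reverse.takeWhile Char.isDigit).reverse := by
  conv_lhs => rw [← cs.reverse_reverse, ← List.takeWhile_append_dropWhile (p := Char.isDigit) (l := cs.reverse)]
  rw [List.reverse_append]

theorem take_of_eq_append {α : Type} {l h t : List α} (e : l = h ++ t) :
    l.take h.length = h := by rw [e]; exact List.take_left

theorem take_kLoop (cs : List Char) :
    cs.take (kLoop cs cs.length) = (cs.reverse.dropWhile Char.isDigit).reverse := by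
  rw [kLoop_len]
  exact take_of_eq_append (head_tail_split cs)

theorem drop_kLoop (cs : List Char) :
    cs.drop (kLoop cs cs.length) = cs.drop ((cs.reverse.dropWhile Char.isDigit).reverse).length := by
  rw [kLoop_len]

theorem mysplit_pred (s : String) :
    mysplit s = (String.ofList ((s.toList.reverse.dropWhile Char.isDigit).reverse),
      String.ofList (s.toList.drop ((s.toList.reverse.dropWhile Char.isDigit).reverse).length)) := by
  have hp : (fun c => decide (c ∈ ("0123456789" : String).toList)) = Char.isDigit :=
    funext digit_pred
  simp only [mysplit, hp]

theorem stepB_eq (c : PySem.Dict String (List Int)) (s : String) :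
    stepB c s = (gIns c s).modify (pr s).1 [] (fun g => insStep g (pr s).2) := by
  simp only [stepB, gIns, insStep, pr, mysplit_pred, take_kLoop, drop_kLoop]

theorem insPos_le (n : Int) (g : List Int) : insPos n g ≤ g.length := by
  induction g with
  | nil => simp [insPos]
  | cons x t ih => simp only [insPos, List.length_cons]; split_ifs <;> omega

theorem insStep_eq_insertBy (g : List Int) (n : Int) :
    insStep g n = PySem.List.insertBy (fun a b => decide ((fun x => x) a < (fun x => x) b)) n g := by
  unfold insStep
  induction g with
  | nil =>
      have := PySem.List.insert_natCast ([] : List Int) 0 n (by simp)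
      simpa [insPos, PySem.List.insertBy] using this
  | cons x t ih =>
      by_cases h : x ≤ n
      · have h1 : insPos n (x :: t) = insPos n t + 1 := by simp [insPos, h]
        rw [h1, PySem.List.insert_natCast _ _ _ (by simpa using insPos_le n t)]
        rw [PySem.List.insert_natCast _ _ _ (insPos_le n t)] at ih
        simp only [PySem.List.insertBy]
        rw [if_neg (by simp; omega)]
        simp [List.take_succ_cons, List.drop_succ_cons, ih]
      · have h1 : insPos n (x :: t) = 0 := by simp [insPos, h]
        rw [h1, PySem.List.insert_natCast _ 0 _ (by simp)]
        simp only [PySem.List.insertBy]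
        rw [if_pos (by simp; omega)]
        simp

set_option maxHeartbeats 2000000 in
theorem getD_stepA (d : PySem.Dict String (List Int)) (s : String) (k : String) :
    (stepA d s).getD k [] = d.getD k [] ++ (if (pr s).1 = k then [(pr s).2] else []) := by
  unfold stepA
  rw [PySem.Dict.getD_modify]
  simp only [pr]
  by_cases hk : k = (mysplit s).1
  · subst hk
    rw [if_pos rfl, if_pos rfl]
    cases hc : d.contains (mysplit s).1 with
    | true => rw [if_pos rfl]
    | false =>
        rw [if_neg Bool.false_ne_true, PySem.Dict.getD_insert_self,
          PySem.Dict.getD_of_not_contains d _ hc]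
  · have hne : ¬(mysplit s).1 = k := fun h => hk h.symm
    rw [if_neg hk, if_neg hne, List.append_nil]
    cases hc : d.contains (mysplit s).1 with
    | true => rw [if_pos rfl]
    | false => rw [if_neg Bool.false_ne_true, PySem.Dict.getD_insert_of_ne _ _ _ hk]

theorem getD_foldA (l : List String) (d : PySem.Dict String (List Int)) (k : String) :
    (l.foldl stepA d).getD k [] =
      d.getD k [] ++ ((l.map pr).filter (fun p => p.1 == k)).map (·.2) := by
  induction l generalizing d with
  | nil => simp
  | cons s t ih =>
      simp only [List.foldl_cons, List.map_cons, List.filter_cons]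
      rw [ih, getD_stepA]
      by_cases h : (pr s).1 = k <;> simp [h]

theorem getD_stepB (d : PySem.Dict String (List Int)) (s : String) (k : String) :
    (stepB d s).getD k [] =
      if (pr s).1 = k then insStep (d.getD k []) (pr s).2 else d.getD k [] := by
  rw [stepB_eq]
  unfold gIns
  rw [PySem.Dict.getD_modify]
  by_cases hk : k = (pr s).1
  · subst hk
    rw [if_pos rfl, if_pos rfl]
    cases hc : d.contains (pr s).1 with
    | true => rw [if_pos rfl]
    | false =>
        rw [if_neg Bool.false_ne_true, PySem.Dict.getD_insert_self,
          PySem.Dict.getD_of_not_contains d _ hc]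
  · have hne : ¬(pr s).1 = k := fun h => hk h.symm
    rw [if_neg hk, if_neg hne]
    cases hc : d.contains (pr s).1 with
    | true => rw [if_pos rfl]
    | false => rw [if_neg Bool.false_ne_true, PySem.Dict.getD_insert_of_ne _ _ _ hk]

theorem getD_foldB (l : List String) (d : PySem.Dict String (List Int)) (k : String) :
    (l.foldl stepB d).getD k [] =
      (((l.map pr).filter (fun p => p.1 == k)).map (·.2)).foldl insStep (d.getD k []) := by
  induction l generalizing d with
  | nil => simp
  | cons s t ih =>
      simp only [List.foldl_cons, List.map_cons, List.filter_cons]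
      rw [ih, getD_stepB]
      by_cases h : (pr s).1 = k <;> simp [h]

theorem keys_modify_add (d : PySem.Dict String (List Int)) (k : String) (f : List Int → List Int) :
    (d.modify k [] f).keys = PySem.Set.add d.keys k := by
  rw [PySem.Dict.keys_modify]
  cases hc : d.contains k with
  | true =>
      have hmem : k ∈ d.keys := (PySem.Dict.contains_iff_mem_keys _ _).mp hc
      rw [PySem.Dict.keys_insert_of_contains _ _ hc, PySem.Set.add_of_mem hmem]
  | false =>
      have hmem : k ∉ d.keys := fun h => by
        rw [(PySem.Dict.contains_iff_mem_keys _ _).mpr h] at hc; cases hc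
      rw [PySem.Dict.keys_insert_of_not_contains _ _ hc, PySem.Set.add_of_not_mem hmem]

theorem keys_stepA (d : PySem.Dict String (List Int)) (s : String) :
    (stepA d s).keys = PySem.Set.add d.keys (pr s).1 := by
  simp only [stepA, pr]
  cases hc : d.contains (mysplit s).1 with
  | true =>
      have hmem : (mysplit s).1 ∈ d.keys := (PySem.Dict.contains_iff_mem_keys _ _).mp hc
      rw [if_pos rfl, keys_modify_add, PySem.Set.add_of_mem hmem]
  | false =>
      have hmem : (mysplit s).1 ∉ d.keys := fun h => by
        rw [(PySem.Dict.contains_iff_mem_keys _ _).mpr h] at hc; cases hc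
      rw [if_neg Bool.false_ne_true, keys_modify_add,
        PySem.Dict.keys_insert_of_not_contains _ _ hc,
        PySem.Set.add_of_mem (by simp), PySem.Set.add_of_not_mem hmem]

theorem keys_stepB (d : PySem.Dict String (List Int)) (s : String) :
    (stepB d s).keys = PySem.Set.add d.keys (pr s).1 := by
  rw [stepB_eq]
  unfold gIns
  cases hc : d.contains (pr s).1 with
  | true =>
      have hmem : (pr s).1 ∈ d.keys := (PySem.Dict.contains_iff_mem_keys _ _).mp hc
      rw [if_pos rfl, keys_modify_add, PySem.Set.add_of_mem hmem]
  | false =>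
      have hmem : (pr s).1 ∉ d.keys := fun h => by
        rw [(PySem.Dict.contains_iff_mem_keys _ _).mpr h] at hc; cases hc
      rw [if_neg Bool.false_ne_true, keys_modify_add,
        PySem.Dict.keys_insert_of_not_contains _ _ hc,
        PySem.Set.add_of_mem (by simp), PySem.Set.add_of_not_mem hmem]

theorem keys_foldA (l : List String) (d : PySem.Dict String (List Int)) :
    (l.foldl stepA d).keys = PySem.Set.update d.keys (l.map fun s => (pr s).1) := by
  induction l generalizing d with
  | nil => rfl
  | cons s t ih => rw [List.foldl_cons, ih, keys_stepA, List.map_cons, PySem.Set.update_cons]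

theorem keys_foldB (l : List String) (d : PySem.Dict String (List Int)) :
    (l.foldl stepB d).keys = PySem.Set.update d.keys (l.map fun s => (pr s).1) := by
  induction l generalizing d with
  | nil => rfl
  | cons s t ih => rw [List.foldl_cons, ih, keys_stepB, List.map_cons, PySem.Set.update_cons]

theorem getD_sortLoop (ks : List String) (d : PySem.Dict String (List Int)) (k : String)
    (hnd : ks.Nodup) :
    (ks.foldl (fun d k => d.modify k [] (fun v => PySem.List.sorted v (fun x => x) false)) d).getD k []
      = if k ∈ ks then PySem.List.sorted (d.getD k []) (fun x => x) false else d.getD k [] := by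
  induction ks generalizing d with
  | nil => simp
  | cons a t ih =>
      rcases List.nodup_cons.mp hnd with ⟨ha, ht⟩
      rw [List.foldl_cons, ih _ ht, PySem.Dict.getD_modify]
      by_cases hk : k ∈ t
      · have hka : k ≠ a := fun h => ha (h ▸ hk)
        simp [hk, hka]
      · by_cases hka : k = a
        · subst hka; simp [hk]
        · simp [hk, hka]

theorem update_eq_self {α : Type} [BEq α] [LawfulBEq α] (s : PySem.Set α) (xs : List α)
    (h : ∀ x ∈ xs, x ∈ s) : PySem.Set.update s xs = s := by
  rw [PySem.Set.update_eq_append_filter]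
  have hnil : (PySem.Set.ofList xs).filter (fun y => !(PySem.Set.contains s y)) = [] := by
    rw [List.filter_eq_nil_iff]
    intro y hy
    have hmem : y ∈ s := h y ((PySem.Set.mem_ofList _ _).mp hy)
    simpa using hmem
  rw [hnil, List.append_nil]

theorem keys_sortLoop (ks : List String) (d : PySem.Dict String (List Int)) :
    (ks.foldl (fun d k => d.modify k [] (fun v => PySem.List.sorted v (fun x => x) false)) d).keys
      = PySem.Set.update d.keys ks := by
  induction ks generalizing d with
  | nil => rfl
  | cons a t ih => rw [List.foldl_cons, ih, keys_modify_add, PySem.Set.update_cons]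

-- ===== VERDICT (by name: the statement is the Claim_ definition above) =====
theorem compact_spec : Claim_equal_compact := by
  intro l _ _
  unfold Spec_compact
  simp only [compact, compact_alt]
  have hAkeys : (l.foldl stepA PySem.Dict.empty).keys
      = PySem.Set.ofList (l.map fun s => (pr s).1) := by
    rw [keys_foldA]; rfl
  have hAnodup : (l.foldl stepA PySem.Dict.empty).keys.Nodup := by
    rw [hAkeys]; exact PySem.Set.nodup_ofList _
  set dA := l.foldl stepA PySem.Dict.empty with hdA
  set dB := l.foldl stepB PySem.Dict.empty with hdB
  have hBkeys : dB.keys = PySem.Set.ofList (l.map fun s => (pr s).1) := by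
    rw [hdB, keys_foldB]; rfl
  have hBnodup : dB.keys.Nodup := by rw [hBkeys]; exact PySem.Set.nodup_ofList _
  set dS := dA.keys.foldl
      (fun d k => d.modify k [] (fun v => PySem.List.sorted v (fun x => x) false)) dA with hdS
  have hSkeys : dS.keys = dA.keys := by
    rw [hdS, keys_sortLoop]
    exact update_eq_self _ _ (fun x hx => hx)
  have hSnodup : dS.keys.Nodup := by rw [hSkeys]; exact hAnodup
  rw [PySem.Dict.items_eq_map_keys dS hSnodup [], PySem.Dict.items_eq_map_keys dB hBnodup []]
  rw [hSkeys, hAkeys, hBkeys]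
  apply List.map_congr_left
  intro k hkmem
  have hk : k ∈ dA.keys := by rw [hAkeys]; exact hkmem
  have hvA : dS.getD k [] = PySem.List.sorted (dA.getD k []) (fun x => x) false := by
    rw [hdS, getD_sortLoop _ _ _ hAnodup, if_pos hk]
  have hgA : dA.getD k [] = ((l.map pr).filter (fun p => p.1 == k)).map (·.2) := by
    rw [hdA, getD_foldA]; simp
  have hvB : dB.getD k []
      = (((l.map pr).filter (fun p => p.1 == k)).map (·.2)).foldl insStep [] := by
    rw [hdB, getD_foldB]; simp
  have hins : (((l.map pr).filter (fun p => p.1 == k)).map (·.2)).foldl insStep []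
      = PySem.List.sorted ((((l.map pr).filter (fun p => p.1 == k)).map (·.2))) (fun x => x) false := by
    rw [PySem.List.sorted_eq_foldl_insertBy]
    exact PySem.List.foldl_congr_mem _ _ _ _ (fun acc x _ => insStep_eq_insertBy acc x)
  rw [hvA, hgA, hvB, hins]
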